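-- pv_equiv track=rewrite | github.com/AaravG42/Biologics | build_kg_vocabulary.py | build_entity_vocab
-- ===== SOURCE A (Python) =====
-- from typing import Dict, Iterable, List, Sequence, Tuple
--
-- Triple = Tuple[str, str, str]
--
-- def build_entity_vocab(triples: Sequence[Triple]) -> Dict[str, int]:
--     entity_to_id: Dict[str, int] = {}
--     for head, _, tail in triples:
--         if head not in entity_to_id:
--             entity_to_id[head] = len(entity_to_id)
--         if tail not in entity_to_id:
--             entity_to_id[tail] = len(entity_to_id)
--     return entity_to_id
-- ===== SOURCE B (Python) =====
-- def build_entity_vocab(triples):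
--     flat = []
--     for head, _, tail in triples:
--         flat.append(head)
--         flat.append(tail)
--     first = {}
--     for i, e in reversed(list(enumerate(flat))):
--         first[e] = i
--     return {e: i for i, e in enumerate(sorted(first, key=first.get))}
-- ===== Notes on version B (the rewrite author's own statement) =====
-- stated objective: alternative
-- what changed: Instead of A's single interleaved pass that inserts head/tail with a running counter, B computes each entity's first-occurrence index by one reverse overwrite pass over the enumerated flattened entity list, then sorts the entities by that index and enumerates to assign ids.
import Mathlib
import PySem

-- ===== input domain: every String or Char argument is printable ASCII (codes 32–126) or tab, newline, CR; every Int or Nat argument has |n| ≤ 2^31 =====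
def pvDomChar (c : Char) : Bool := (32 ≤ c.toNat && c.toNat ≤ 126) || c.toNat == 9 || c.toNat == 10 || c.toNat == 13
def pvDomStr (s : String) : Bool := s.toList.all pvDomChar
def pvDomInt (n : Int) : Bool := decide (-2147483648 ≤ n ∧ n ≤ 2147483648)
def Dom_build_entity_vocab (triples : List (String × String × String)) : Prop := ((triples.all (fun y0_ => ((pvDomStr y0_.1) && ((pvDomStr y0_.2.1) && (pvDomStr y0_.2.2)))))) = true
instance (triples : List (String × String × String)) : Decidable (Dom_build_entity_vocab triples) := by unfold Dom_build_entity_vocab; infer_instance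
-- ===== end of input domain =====

-- B replaces A's interleaved insert-if-absent pass with counter ids by: compute each entity's
-- first-occurrence index with a single reverse overwrite pass over enumerate(flat), then sort the
-- entities by that index and enumerate; same result, a sort-based alternative decomposition.


-- ===== PORT A =====
def build_entity_vocab (triples : List (String × String × String)) : List (String × Int) :=
  (triples.foldl
    (fun entity_to_id t =>
      let d1 := if !(entity_to_id.contains t.1) then
                  entity_to_id.insert t.1 ((entity_to_id.size : Int))
                else entity_to_id
      if !(d1.contains t.2.2) then d1.insert t.2.2 ((d1.size : Int)) else d1)
    (PySem.Dict.empty : PySem.Dict String Int)).items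

-- ===== PORT B =====
def build_entity_vocab_alt (triples : List (String × String × String)) : List (String × Int) :=
  let flat := triples.foldl (fun acc t => (acc ++ [t.1]) ++ [t.2.2]) ([] : List String)
  let first := (PySem.List.enumerate flat 0).reverse.foldl
    (fun d q => d.insert q.2 q.1) (PySem.Dict.empty : PySem.Dict String Int)
  -- key=first.get: every element of first.keys is present in first, so .getD _ 0 is exact
  let order := PySem.List.sorted first.keys (fun e => first.getD e 0) false
  ((PySem.List.enumerate order 0).foldl
      (fun d q => d.insert q.2 q.1) (PySem.Dict.empty : PySem.Dict String Int)).items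

-- ===== PRECONDITION & SPEC =====
def Spec_build_entity_vocab (triples : List (String × String × String)) (out : List (String × Int)) : Prop := out = build_entity_vocab_alt triples
instance (triples : List (String × String × String)) (out : List (String × Int)) : Decidable (Spec_build_entity_vocab triples out) := by unfold Spec_build_entity_vocab; infer_instance

-- ===== CLAIM (what is proved, stated in full; the proofs are below) =====
def Claim_equal_build_entity_vocab : Prop := ∀ (triples : List (String × String × String)), Dom_build_entity_vocab triples → Spec_build_entity_vocab triples (build_entity_vocab triples)

-- ===== LEMMAS AND PROOFS =====

-- A's per-entity step: insert with the next id if absent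
def pvStepE (d : PySem.Dict String Int) (e : String) : PySem.Dict String Int :=
  if !(d.contains e) then d.insert e ((d.size : Int)) else d

lemma pv_foldl_triples_eq_flat (ts : List (String × String × String)) (d : PySem.Dict String Int) :
    ts.foldl (fun d t => pvStepE (pvStepE d t.1) t.2.2) d
      = (ts.flatMap (fun t => [t.1, t.2.2])).foldl pvStepE d := by
  induction ts generalizing d with
  | nil => rfl
  | cons t ts ih => simp [List.foldl_cons, ih]

lemma pv_flat_eq (ts : List (String × String × String)) (acc : List String) :
    ts.foldl (fun acc t => (acc ++ [t.1]) ++ [t.2.2]) acc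
      = acc ++ ts.flatMap (fun t => [t.1, t.2.2]) := by
  induction ts generalizing acc with
  | nil => simp
  | cons t ts ih => simp [List.foldl_cons, List.flatMap]

-- A's fold characterised: its items are the deduped entities paired with 0,1,2,…
lemma pv_foldl_stepE_items (es : List String) :
    ((es.foldl pvStepE (PySem.Dict.empty : PySem.Dict String Int))).items
      = (PySem.List.enumerate (PySem.List.dedup es) 0).map (fun q => (q.2, q.1)) := by
  induction es using List.reverseRecOn with
  | nil => rfl
  | append_singleton es e ih =>
    have hkeys : (es.foldl pvStepE (PySem.Dict.empty : PySem.Dict String Int)).keys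
        = PySem.List.dedup es := by
      show ((es.foldl pvStepE PySem.Dict.empty).items.map (·.1)) = _
      rw [ih]
      simp [List.map_map, Function.comp_def, PySem.List.map_snd_enumerate]
    have hsize : (es.foldl pvStepE (PySem.Dict.empty : PySem.Dict String Int)).size
        = (PySem.List.dedup es).length := by
      show ((es.foldl pvStepE PySem.Dict.empty).items.length) = _
      rw [ih]; simp [PySem.List.length_enumerate]
    have hcont : (es.foldl pvStepE (PySem.Dict.empty : PySem.Dict String Int)).contains e
        = decide (e ∈ PySem.List.dedup es) := by
      rw [PySem.Dict.contains_eq_decide_mem_keys, hkeys]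
    rw [List.foldl_append, List.foldl_cons, List.foldl_nil]
    by_cases he : e ∈ PySem.List.dedup es
    · have : PySem.List.dedup (es ++ [e]) = PySem.List.dedup es := by
        simp only [PySem.List.dedup_eq_ofList, PySem.Set.ofList_append_singleton]
        exact PySem.Set.add_of_mem (by simpa [PySem.List.dedup_eq_ofList] using he)
      rw [this, pvStepE, hcont]
      simp only [he, decide_true, Bool.not_true, Bool.false_eq_true, if_false]
      exact ih
    · have hded : PySem.List.dedup (es ++ [e]) = PySem.List.dedup es ++ [e] := by
        simp only [PySem.List.dedup_eq_ofList, PySem.Set.ofList_append_singleton]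
        exact PySem.Set.add_of_not_mem (by simpa [PySem.List.dedup_eq_ofList] using he)
      rw [pvStepE, hcont]
      simp only [he, decide_false, Bool.not_false, if_true]
      rw [PySem.Dict.items_insert, hcont]
      simp only [he, decide_false, Bool.false_eq_true, if_false]
      rw [ih, hsize, hded, PySem.List.enumerate_append]
      simp [PySem.List.enumerate_cons]

-- Mathlib's idxOf? is idxOf on a member (used to read B's first-occurrence dict)
lemma pv_idxOf?_eq_some (xs : List String) (e : String) (h : e ∈ xs) :
    List.idxOf? e xs = some (xs.idxOf e) := by
  induction xs with
  | nil => cases h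
  | cons x xs ih =>
    by_cases hx : x = e
    · subst hx; simp [List.idxOf?, List.idxOf, List.findIdx?_cons, List.findIdx_cons]
    · have hb : (x == e) = false := by simp [hx]
      have he : e ∈ xs := by cases h with | head => exact absurd rfl hx | tail _ h => exact h
      have h2 := ih he
      simp only [List.idxOf?, List.idxOf] at h2
      simp only [List.idxOf?, List.idxOf, List.findIdx?_cons, List.findIdx_cons, hb, cond_false, h2]
      rfl

-- B's reverse overwrite pass: the surviving value for a key is its FIRST index
lemma pv_first_get (xs : List String) (n : Int) (d : PySem.Dict String Int) (e : String) :
    ((PySem.List.enumerate xs n).reverse.foldl (fun d q => d.insert q.2 q.1) d).get? e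
      = match PySem.List.index? xs e with
        | some k => some (n + k)
        | none => d.get? e := by
  induction xs generalizing n d with
  | nil => simp [PySem.List.enumerate_nil, PySem.List.index?]
  | cons x xs ih =>
    rw [PySem.List.enumerate_cons, List.reverse_cons, List.foldl_append, List.foldl_cons,
        List.foldl_nil, PySem.Dict.get?_insert]
    by_cases hx : e = x
    · subst hx
      rw [PySem.List.index?_cons_self]
      simp
    · rw [if_neg hx, ih, PySem.List.index?_cons_of_ne xs (Ne.symm hx)]
      cases hidx : PySem.List.index? xs e with
      | none => simp
      | some k => simp; ring

lemma pv_first_getD (xs : List String) (e : String) (h : e ∈ xs) :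
    ((PySem.List.enumerate xs 0).reverse.foldl (fun d q => d.insert q.2 q.1)
        (PySem.Dict.empty : PySem.Dict String Int)).getD e 0 = (xs.idxOf e : Int) := by
  rw [PySem.Dict.getD_eq_get?_getD, pv_first_get]
  rw [show PySem.List.index? xs e = some (xs.idxOf e) by
        rw [PySem.List.index?_eq_idxOf?]; exact pv_idxOf?_eq_some xs e h]
  simp

lemma pv_first_keys (xs : List String) :
    ((PySem.List.enumerate xs 0).reverse.foldl (fun d q => d.insert q.2 q.1)
        (PySem.Dict.empty : PySem.Dict String Int)).keys = PySem.List.dedup xs.reverse := by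
  have h := PySem.Dict.keys_foldl_insert_key (ν := Int) ((PySem.List.enumerate xs 0).reverse)
      (fun q => q.2) (fun _ q => q.1) PySem.Dict.empty
  rw [h]
  rw [PySem.Dict.keys_empty, List.map_reverse, PySem.List.map_snd_enumerate]
  rw [PySem.List.dedup_eq_ofList, PySem.Set.update_nil_left]

-- dedup lists entities in strictly increasing order of first occurrence
lemma pv_dedup_pairwise (xs : List String) :
    (PySem.List.dedup xs).Pairwise (fun a b => xs.idxOf a < xs.idxOf b) := by
  induction xs using List.reverseRecOn with
  | nil => simp [PySem.List.dedup_eq_ofList, PySem.Set.ofList_nil]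
  | append_singleton xs x ih =>
    have hmem : ∀ a ∈ PySem.List.dedup xs, a ∈ xs := fun a ha =>
      (PySem.List.mem_dedup _ _).1 ha
    by_cases hx : x ∈ xs
    · have hd : PySem.List.dedup (xs ++ [x]) = PySem.List.dedup xs := by
        simp only [PySem.List.dedup_eq_ofList, PySem.Set.ofList_append_singleton]
        exact PySem.Set.add_of_mem (by simpa [PySem.Set.mem_ofList] using hx)
      rw [hd]
      exact List.Pairwise.imp_of_mem
        (fun ha hb hr => by
          rw [List.idxOf_append_of_mem (hmem _ ha), List.idxOf_append_of_mem (hmem _ hb)]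
          exact hr) ih
    · have hd : PySem.List.dedup (xs ++ [x]) = PySem.List.dedup xs ++ [x] := by
        simp only [PySem.List.dedup_eq_ofList, PySem.Set.ofList_append_singleton]
        exact PySem.Set.add_of_not_mem (by simpa [PySem.Set.mem_ofList] using hx)
      rw [hd, List.pairwise_append]
      refine ⟨List.Pairwise.imp_of_mem
        (fun ha hb hr => by
          rw [List.idxOf_append_of_mem (hmem _ ha), List.idxOf_append_of_mem (hmem _ hb)]
          exact hr) ih, List.pairwise_singleton _ _, ?_⟩
      intro a ha b hb
      rw [List.mem_singleton] at hb
      subst hb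
      rw [List.idxOf_append_of_mem (hmem _ ha),
          List.idxOf_append_of_notMem hx]
      simp only [List.idxOf_cons_self, Nat.add_zero]
      exact List.idxOf_lt_length_of_mem (hmem _ ha)

-- the final fold over fresh distinct keys (shared by the characterisations of A and B)
theorem pv_b_items (u : List String) (hu : u.Nodup) :
    ((PySem.List.enumerate u 0).foldl (fun d q => d.insert q.2 q.1)
        (PySem.Dict.empty : PySem.Dict String Int)).items
      = (PySem.List.enumerate u 0).map (fun q => (q.2, q.1)) := by
  have := PySem.Dict.items_foldl_insert_fresh (l := PySem.List.enumerate u 0)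
    (k := fun q => q.2) (v := fun q => q.1) (d := (PySem.Dict.empty : PySem.Dict String Int))
    (by intro a _; simp [PySem.Dict.contains_empty])
    (by rw [PySem.List.map_snd_enumerate]; exact hu)
  simpa using this

-- B's sort step names the dedup order: sorted(keys, key=first index) = dedup flat
lemma pv_order_eq (xs : List String) :
    PySem.List.sorted
      ((( PySem.List.enumerate xs 0).reverse.foldl (fun d q => d.insert q.2 q.1)
          (PySem.Dict.empty : PySem.Dict String Int)).keys)
      (fun e => ((PySem.List.enumerate xs 0).reverse.foldl (fun d q => d.insert q.2 q.1)
          (PySem.Dict.empty : PySem.Dict String Int)).getD e 0) false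
    = PySem.List.dedup xs := by
  rw [pv_first_keys]
  apply PySem.List.sorted_eq_of_perm_of_pairwise_lt
  · rw [List.perm_ext_iff_of_nodup (PySem.List.nodup_dedup xs) (PySem.List.nodup_dedup _)]
    intro a
    simp only [PySem.List.mem_dedup, List.mem_reverse]
  · refine List.Pairwise.imp_of_mem (fun ha hb hr => ?_) (pv_dedup_pairwise xs)
    rw [pv_first_getD xs _ ((PySem.List.mem_dedup _ _).1 ha),
        pv_first_getD xs _ ((PySem.List.mem_dedup _ _).1 hb)]
    exact_mod_cast hr

-- ===== VERDICT (by name: the statement is the Claim_ definition above) =====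
theorem build_entity_vocab_spec : Claim_equal_build_entity_vocab := by
  intro triples _
  show build_entity_vocab triples = build_entity_vocab_alt triples
  have hB : build_entity_vocab_alt triples
      = (PySem.List.enumerate
          (PySem.List.dedup (triples.flatMap (fun t => [t.1, t.2.2]))) 0).map
          (fun q => (q.2, q.1)) := by
    simp only [build_entity_vocab_alt]
    rw [pv_flat_eq, List.nil_append, pv_order_eq, pv_b_items _ (PySem.List.nodup_dedup _)]
  have hA : (triples.foldl (fun d t => pvStepE (pvStepE d t.1) t.2.2)
        (PySem.Dict.empty : PySem.Dict String Int)).items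
      = (PySem.List.enumerate
          (PySem.List.dedup (triples.flatMap (fun t => [t.1, t.2.2]))) 0).map
          (fun q => (q.2, q.1)) := by
    rw [pv_foldl_triples_eq_flat, pv_foldl_stepE_items]
  rw [hB]
  exact hA
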